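-- pv_equiv track=rewrite | github.com/joDis06/value | oldFiles/PYTHON/Python Files/May19CW.py | summarizeList
-- ===== SOURCE A (Python) =====
-- def summarizeList(numberString):
--     mean = 0
--     median = 0
--     R = 0
--     N = []
--     for x in ((numberString.split(","))):
--         N += x
--
--     return N
-- ===== SOURCE B (Python) =====
-- def summarizeList(numberString):
--     return list(numberString.replace(",", ""))
-- ===== Notes on version B (the rewrite author's own statement) =====
-- stated objective: simpler
-- what changed: A tokenizes on the comma separator and grows a list by += over each token; B skips tokenization and the unused mean/median/R accumulators, deleting the separator from the string in one replace call and splatting the remaining characters into a list.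
import Mathlib
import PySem

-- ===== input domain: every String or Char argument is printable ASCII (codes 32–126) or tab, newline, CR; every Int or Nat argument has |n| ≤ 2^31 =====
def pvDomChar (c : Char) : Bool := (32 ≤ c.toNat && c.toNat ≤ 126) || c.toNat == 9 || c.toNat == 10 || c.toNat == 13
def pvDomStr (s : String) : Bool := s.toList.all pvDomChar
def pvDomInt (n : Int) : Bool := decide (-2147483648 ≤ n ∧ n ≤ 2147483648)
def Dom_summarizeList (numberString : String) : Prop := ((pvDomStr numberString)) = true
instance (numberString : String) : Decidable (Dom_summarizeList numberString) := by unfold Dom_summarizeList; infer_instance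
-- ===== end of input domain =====

-- B drops A's split-on-comma tokenization and unused accumulators: it is list(numberString.replace(",","")) — simpler, same O(n) cost.

-- ===== PORT A =====
def summarizeList (numberString : String) : List String :=
  -- mean, median, R are assigned and never used; N = []; for x in s.split(","): N += x
  let parts := (PySem.Str.split? numberString ",").getD []
  parts.foldl (fun N x => N ++ x.toList.map (fun c => String.ofList [c])) []

-- ===== PORT B =====
def summarizeList_alt (numberString : String) : List String :=
  (PySem.Str.replace numberString "," "").toList.map (fun c => String.ofList [c])

-- ===== PRECONDITION & SPEC =====
def Spec_summarizeList (numberString : String) (out : List String) : Prop := out = summarizeList_alt numberString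
instance (numberString : String) (out : List String) : Decidable (Spec_summarizeList numberString out) := by unfold Spec_summarizeList; infer_instance

-- ===== CLAIM (what is proved, stated in full; the proofs are below) =====
def Claim_equal_summarizeList : Prop := ∀ (numberString : String), Dom_summarizeList numberString → Spec_summarizeList numberString (summarizeList numberString)

-- ===== LEMMAS AND PROOFS =====

theorem replace_go_comma (fuel : Nat) : ∀ (l acc : List Char), l.length ≤ fuel →
    PySem.Chars.replace.go [','] [] fuel l acc = acc.reverse ++ l.filter (fun c => !(c == ',')) := by
  induction fuel with
  | zero =>
    intro l acc h
    have : l = [] := List.eq_nil_of_length_eq_zero (Nat.le_zero.mp h)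
    subst this
    simp [PySem.Chars.replace.go]
  | succ n ih =>
    intro l acc h
    cases l with
    | nil => simp [PySem.Chars.replace.go]
    | cons c t =>
      simp only [List.length_cons] at h
      simp only [PySem.Chars.replace.go, List.isPrefixOf]
      by_cases hc : c = ','
      · subst hc
        rw [if_pos (by simp)]
        simp only [List.length_cons, List.length_nil, Nat.zero_add, List.drop_succ_cons,
          List.drop_zero, List.reverse_nil, List.nil_append]
        rw [ih t acc (by omega)]
        simp
      · rw [if_neg (by simp [beq_iff_eq]; exact fun h' => hc h'.symm)]
        rw [ih t (c :: acc) (by omega)]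
        simp [hc]

theorem splitOn_go_flatten (fuel : Nat) : ∀ (l cur : List Char) (acc : List (List Char)),
    l.length < fuel →
    (PySem.Chars.splitOn.go [','] fuel l cur acc).flatten
      = acc.reverse.flatten ++ cur.reverse ++ l.filter (fun c => !(c == ',')) := by
  induction fuel with
  | zero => intro l cur acc h; omega
  | succ n ih =>
    intro l cur acc h
    cases l with
    | nil => simp [PySem.Chars.splitOn.go]
    | cons c t =>
      simp only [List.length_cons] at h
      simp only [PySem.Chars.splitOn.go, List.isPrefixOf]
      by_cases hc : c = ','
      · subst hc
        rw [if_pos (by simp)]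
        simp only [List.length_cons, List.length_nil, Nat.zero_add, List.drop_succ_cons,
          List.drop_zero]
        rw [ih t [] (List.reverse cur :: acc) (by omega)]
        simp
      · rw [if_neg (by simp [beq_iff_eq]; exact fun h' => hc h'.symm)]
        rw [ih t (c :: cur) acc (by omega)]
        simp [hc]

-- ===== VERDICT (by name: the statement is the Claim_ definition above) =====
theorem summarizeList_spec : Claim_equal_summarizeList := by
  intro s _
  unfold Spec_summarizeList summarizeList summarizeList_alt
  have hsplit : (PySem.Str.split? s ",").getD []
      = (PySem.Chars.splitOn s.toList [',']).map String.ofList := by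
    simp [PySem.Str.split?, PySem.Chars.split?]
  rw [hsplit, PySem.List.foldl_append_eq_flatMap]
  have hrep : (PySem.Str.replace s "," "").toList
      = s.toList.filter (fun c => !(c == ',')) := by
    rw [PySem.Str.toList_replace]
    simp only [PySem.Chars.replace]
    rw [if_neg (by simp)]
    simpa using replace_go_comma s.toList.length s.toList [] le_rfl
  rw [hrep]
  have hflat : (PySem.Chars.splitOn s.toList [',']).flatten
      = s.toList.filter (fun c => !(c == ',')) := by
    unfold PySem.Chars.splitOn
    simpa using splitOn_go_flatten (s.toList.length + 1) s.toList [] [] (by omega)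
  calc ([] : List String) ++ ((PySem.Chars.splitOn s.toList [',']).map String.ofList).flatMap
          (fun x => x.toList.map (fun c => String.ofList [c]))
      = (PySem.Chars.splitOn s.toList [',']).flatten.map (fun c => String.ofList [c]) := by
        simp only [List.nil_append, List.flatMap_def, List.map_map, Function.comp_def,
          String.toList_ofList, List.map_flatten]
    _ = (s.toList.filter (fun c => !(c == ','))).map (fun c => String.ofList [c]) := by rw [hflat]
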